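-- pv_equiv track=rewrite | github.com/chtmp223/suri | utils.py | truncating_words
-- ===== SOURCE A (Python) =====
-- def truncating_words(document, max_tokens):
--     """
--     Truncating the document down to contain only max_tokens
--     """
--     lines = document.split("\n")
--     word_count = 0
--     truncated_document = []
--
--     for line in lines:
--         words_in_line = line.split()
--         for word in words_in_line:
--             if word_count < max_tokens:
--                 truncated_document.append(word)
--                 word_count += 1
--             else:
--                 break
--         if word_count >= max_tokens:
--             break
--         truncated_document.append("\n")
--
--     return " ".join(truncated_document).strip()
-- ===== SOURCE B (Python) =====
-- def truncating_words(document, max_tokens):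
--     """
--     Truncating the document down to contain only max_tokens
--     """
--     # Build the full flat token stream once (words plus a "\n" marker per line),
--     # then make a single budgeted scan over it.
--     tokens = []
--     for line in document.split("\n"):
--         tokens.extend(line.split())
--         tokens.append("\n")
--
--     result = []
--     count = 0
--     for tok in tokens:
--         if tok == "\n":
--             result.append(tok)
--         else:
--             if count >= max_tokens:
--                 break
--             result.append(tok)
--             count += 1
--
--     return " ".join(result).strip()
-- ===== Notes on version B (the rewrite author's own statement) =====
-- stated objective: alternative
-- what changed: A's nested loop over lines with an interleaved budget check and two early breaks is replaced by first materializing the whole flat token stream (words plus one '\n' marker per line) and then a single separate budgeted scan over it that stops before the word that would exceed the cap.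
import Mathlib
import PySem

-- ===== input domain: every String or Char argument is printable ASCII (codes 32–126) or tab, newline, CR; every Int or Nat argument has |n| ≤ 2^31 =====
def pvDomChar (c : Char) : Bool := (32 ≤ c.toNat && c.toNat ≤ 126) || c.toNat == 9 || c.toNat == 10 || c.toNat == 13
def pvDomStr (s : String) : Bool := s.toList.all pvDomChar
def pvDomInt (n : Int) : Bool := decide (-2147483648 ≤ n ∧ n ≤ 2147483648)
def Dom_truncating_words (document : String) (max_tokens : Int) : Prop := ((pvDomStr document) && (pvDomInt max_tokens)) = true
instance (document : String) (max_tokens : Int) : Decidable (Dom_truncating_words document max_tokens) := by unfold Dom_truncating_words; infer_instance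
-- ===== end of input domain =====

-- B replaces A's nested lines/words loop (budget check interleaved, two early breaks) by
-- building the whole flat token stream first and then one separate budgeted scan over it
-- (objective: alternative decomposition, same cost).

-- ===== PORT A =====
-- inner `for word in words_in_line` loop: appends while word_count < max_tokens, breaks otherwise
def twInnerA (maxT : Int) : List String → Int → List String → (List String × Int)
  | [], wc, acc => (acc, wc)
  | w :: ws, wc, acc =>
    if wc < maxT then twInnerA maxT ws (wc + 1) (acc ++ [w]) else (acc, wc)

-- outer `for line in lines` loop: breaks when word_count >= max_tokens, else appends "\n"
def twOuterA (maxT : Int) : List String → Int → List String → List String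
  | [], _, acc => acc
  | line :: rest, wc, acc =>
    let r := twInnerA maxT (PySem.Str.split₀ line) wc acc
    if maxT ≤ r.2 then r.1 else twOuterA maxT rest r.2 (r.1 ++ ["\n"])

def truncating_words (document : String) (max_tokens : Int) : String :=
  PySem.Str.strip (PySem.Str.join " "
    (twOuterA max_tokens ((PySem.Chars.splitOn document.toList ['\n']).map String.ofList) 0 []))

-- ===== PORT B =====
-- first loop of B: build the complete flat token stream (words, plus one "\n" marker per line)
def twFlatB (lines : List String) : List String :=
  lines.foldl (fun acc line => (acc ++ PySem.Str.split₀ line) ++ ["\n"]) []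

-- second loop of B: one budgeted scan; "\n" markers are copied, words consume budget,
-- the scan stops before the word that would reach the cap
def twScanB (maxT : Int) : List String → Int → List String → List String
  | [], _, acc => acc
  | t :: ts, cnt, acc =>
    if t = "\n" then twScanB maxT ts cnt (acc ++ [t])
    else if maxT ≤ cnt then acc
    else twScanB maxT ts (cnt + 1) (acc ++ [t])

def truncating_words_alt (document : String) (max_tokens : Int) : String :=
  PySem.Str.strip (PySem.Str.join " "
    (twScanB max_tokens (twFlatB ((PySem.Chars.splitOn document.toList ['\n']).map String.ofList)) 0 []))

-- ===== PRECONDITION & SPEC =====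
def Spec_truncating_words (document : String) (max_tokens : Int) (out : String) : Prop := out = truncating_words_alt document max_tokens
instance (document : String) (max_tokens : Int) (out : String) : Decidable (Spec_truncating_words document max_tokens out) := by unfold Spec_truncating_words; infer_instance

-- ===== CLAIM (what is proved, stated in full; the proofs are below) =====
def Claim_equal_truncating_words : Prop := ∀ (document : String) (max_tokens : Int), Dom_truncating_words document max_tokens → Spec_truncating_words document max_tokens (truncating_words document max_tokens)

-- ===== LEMMAS AND PROOFS =====

-- accumulator extraction
lemma twInnerA_acc (m : Int) : ∀ (ws : List String) (wc : Int) (acc : List String),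
    twInnerA m ws wc acc = (acc ++ (twInnerA m ws wc []).1, (twInnerA m ws wc []).2) := by
  intro ws
  induction ws with
  | nil => intro wc acc; simp [twInnerA]
  | cons w ws ih =>
    intro wc acc
    by_cases h : wc < m
    · simp only [twInnerA, if_pos h, List.nil_append]
      rw [ih (wc + 1) (acc ++ [w]), ih (wc + 1) [w]]
      simp
    · simp [twInnerA, if_neg h]

lemma twOuterA_acc (m : Int) : ∀ (ls : List String) (wc : Int) (acc : List String),
    twOuterA m ls wc acc = acc ++ twOuterA m ls wc [] := by
  intro ls
  induction ls with
  | nil => intro wc acc; simp [twOuterA]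
  | cons line rest ih =>
    intro wc acc
    simp only [twOuterA]
    rw [twInnerA_acc m _ wc acc, twInnerA_acc m _ wc []]
    by_cases h : m ≤ (twInnerA m (PySem.Str.split₀ line) wc []).2
    · simp [h]
    · simp only [h, if_false, List.nil_append]
      rw [ih _ ((acc ++ _) ++ ["\n"]), ih _ (_ ++ ["\n"])]
      simp

lemma twScanB_acc (m : Int) : ∀ (ts : List String) (cnt : Int) (acc : List String),
    twScanB m ts cnt acc = acc ++ twScanB m ts cnt [] := by
  intro ts
  induction ts with
  | nil => intro cnt acc; simp [twScanB]
  | cons t ts ih =>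
    intro cnt acc
    by_cases h : t = "\n"
    · simp only [twScanB, if_pos h]
      rw [ih cnt (acc ++ [t]), ih cnt ([] ++ [t])]
      simp
    · by_cases h2 : m ≤ cnt
      · simp [twScanB, h, h2]
      · simp only [twScanB, if_neg h, if_neg h2]
        rw [ih (cnt + 1) (acc ++ [t]), ih (cnt + 1) ([] ++ [t])]
        simp

-- the words produced by str.split() contain no whitespace character
lemma split0_go_nospace : ∀ (s cur : List Char) (acc : List (List Char)),
    (∀ c ∈ cur, PySem.Chars.isspace c = false) →
    (∀ w ∈ acc, ∀ c ∈ w, PySem.Chars.isspace c = false) →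
    ∀ w ∈ PySem.Chars.split₀.go s cur acc, ∀ c ∈ w, PySem.Chars.isspace c = false := by
  intro s
  induction s with
  | nil =>
    intro cur acc hcur hacc w hw
    simp only [PySem.Chars.split₀.go] at hw
    split at hw
    · rw [List.mem_reverse] at hw; exact hacc w hw
    · rw [List.mem_reverse] at hw
      rcases List.mem_cons.mp hw with h | h
      · subst h; intro c hc; exact hcur c (List.mem_reverse.mp hc)
      · exact hacc w h
  | cons c rest ih =>
    intro cur acc hcur hacc w hw
    simp only [PySem.Chars.split₀.go] at hw
    by_cases hsp : PySem.Chars.isspace c = true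
    · rw [if_pos hsp] at hw
      split at hw
      · exact ih [] acc (by simp) hacc w hw
      · refine ih [] (cur.reverse :: acc) (by simp) ?_ w hw
        intro w' hw' c' hc'
        rcases List.mem_cons.mp hw' with h | h
        · subst h; exact hcur c' (List.mem_reverse.mp hc')
        · exact hacc w' h c' hc'
    · rw [if_neg hsp] at hw
      refine ih (c :: cur) acc ?_ hacc w hw
      intro c' hc'
      rcases List.mem_cons.mp hc' with h | h
      · subst h; exact Bool.not_eq_true _ ▸ hsp
      · exact hcur c' h

lemma split0_ne_newline (l : String) : ∀ w ∈ PySem.Str.split₀ l, w ≠ "\n" := by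
  intro w hw heq
  simp only [PySem.Str.split₀, List.mem_map] at hw
  obtain ⟨cs, hcs, hofl⟩ := hw
  have hns := split0_go_nospace l.toList [] [] (by simp) (by simp) cs hcs
  have : cs = ['\n'] := by
    have := congrArg String.toList hofl
    simpa [heq] using this
  subst this
  have := hns '\n' (by simp)
  simp [PySem.Chars.isspace] at this

-- once the budget is exhausted, the scan copies only the leading "\n" markers
lemma twScanB_exhausted (m : Int) : ∀ (ts : List String) (cnt : Int), m ≤ cnt →
    ∃ k : Nat, twScanB m ts cnt [] = List.replicate k "\n" := by
  intro ts
  induction ts with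
  | nil => intro cnt _; exact ⟨0, by simp [twScanB]⟩
  | cons t ts ih =>
    intro cnt hcnt
    by_cases h : t = "\n"
    · obtain ⟨k, hk⟩ := ih cnt hcnt
      refine ⟨k + 1, ?_⟩
      simp only [twScanB, if_pos h]
      rw [twScanB_acc, hk]
      simp [h, List.replicate_succ]
    · exact ⟨0, by simp [twScanB, h, hcnt]⟩

-- scanning the words of one line: the scan behaves exactly like A's inner loop, and either
-- breaks inside the words (budget hit with words remaining) or continues with the rest
lemma twScanB_words (m : Int) : ∀ (ws ts : List String) (wc : Int),
    (∀ w ∈ ws, w ≠ "\n") →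
    (twScanB m (ws ++ ts) wc [] = (twInnerA m ws wc []).1 ∧ m ≤ (twInnerA m ws wc []).2)
    ∨ twScanB m (ws ++ ts) wc [] = (twInnerA m ws wc []).1 ++ twScanB m ts (twInnerA m ws wc []).2 [] := by
  intro ws
  induction ws with
  | nil => intro ts wc _; right; simp [twInnerA]
  | cons w ws ih =>
    intro ts wc hno
    have hwne : ¬ (w = "\n") := hno w (List.mem_cons_self)
    by_cases h : wc < m
    · have hnotle : ¬ m ≤ wc := by omega
      have hsplit : twScanB m ((w :: ws) ++ ts) wc [] = w :: twScanB m (ws ++ ts) (wc + 1) [] := by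
        simp only [List.cons_append, twScanB, if_neg hwne, if_neg hnotle]
        rw [twScanB_acc]
        simp
      have hinner : twInnerA m (w :: ws) wc [] =
          (w :: (twInnerA m ws (wc + 1) []).1, (twInnerA m ws (wc + 1) []).2) := by
        simp only [twInnerA, if_pos h, List.nil_append]
        rw [twInnerA_acc m ws (wc + 1) [w]]
        simp
      rcases ih ts (wc + 1) (fun w' hw' => hno w' (List.mem_cons_of_mem _ hw')) with ⟨he, hge⟩ | he
      · left
        constructor
        · rw [hsplit, he, hinner]
        · rw [hinner]; simpa using hge
      · right
        rw [hsplit, he, hinner]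
        simp
    · left
      have hle : m ≤ wc := by omega
      constructor
      · simp [twScanB, twInnerA, hwne, hle, h]
      · simp [twInnerA, h, hle]

-- the flat token list B builds is the concatenation of per-line word lists with "\n" markers
lemma twFlatB_eq (ls : List String) :
    twFlatB ls = ls.flatMap (fun l => PySem.Str.split₀ l ++ ["\n"]) := by
  unfold twFlatB
  have h : (fun (acc : List String) (line : String) => (acc ++ PySem.Str.split₀ line) ++ ["\n"])
      = (fun acc line => acc ++ (PySem.Str.split₀ line ++ ["\n"])) := by
    funext acc line; simp
  rw [h, PySem.List.foldl_append_eq_flatMap]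
  simp

-- MAIN: B's scan output is A's output followed by some trailing "\n" markers
lemma twScanB_eq_twOuterA (m : Int) : ∀ (ls : List String) (wc : Int),
    ∃ k : Nat, twScanB m (ls.flatMap (fun l => PySem.Str.split₀ l ++ ["\n"])) wc []
      = twOuterA m ls wc [] ++ List.replicate k "\n" := by
  intro ls
  induction ls with
  | nil => intro wc; exact ⟨0, by simp [twScanB, twOuterA]⟩
  | cons line rest ih =>
    intro wc
    have hflat : (line :: rest).flatMap (fun l => PySem.Str.split₀ l ++ ["\n"])
        = PySem.Str.split₀ line ++ ("\n" :: rest.flatMap (fun l => PySem.Str.split₀ l ++ ["\n"])) := by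
      simp [List.flatMap_cons]
    rcases twScanB_words m (PySem.Str.split₀ line)
        ("\n" :: rest.flatMap (fun l => PySem.Str.split₀ l ++ ["\n"])) wc (split0_ne_newline line)
      with ⟨he, hge⟩ | he
    · refine ⟨0, ?_⟩
      rw [hflat, he]
      simp [twOuterA, hge]
    · rw [hflat, he]
      have hstep : twScanB m ("\n" :: rest.flatMap (fun l => PySem.Str.split₀ l ++ ["\n"]))
            ((twInnerA m (PySem.Str.split₀ line) wc []).2) []
          = "\n" :: twScanB m (rest.flatMap (fun l => PySem.Str.split₀ l ++ ["\n"]))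
            ((twInnerA m (PySem.Str.split₀ line) wc []).2) [] := by
        simp only [twScanB, if_pos rfl]
        rw [twScanB_acc]
        simp
      rw [hstep]
      by_cases hle : m ≤ (twInnerA m (PySem.Str.split₀ line) wc []).2
      · obtain ⟨k, hk⟩ := twScanB_exhausted m _ _ hle
        refine ⟨k + 1, ?_⟩
        rw [hk]
        simp [twOuterA, hle, List.replicate_succ]
      · obtain ⟨k, hk⟩ := ih ((twInnerA m (PySem.Str.split₀ line) wc []).2)
        refine ⟨k, ?_⟩
        rw [hk]
        simp only [twOuterA, hle, if_false]
        rw [twOuterA_acc m rest _ (_ ++ ["\n"])]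
        simp

-- trailing whitespace is stripped
lemma strip_append_ws (cs ws : List Char) (h : ∀ c ∈ ws, PySem.Chars.isspace c = true) :
    PySem.Chars.strip (cs ++ ws) = PySem.Chars.strip cs := by
  have hws : List.dropWhile PySem.Chars.isspace ws = [] := by
    rw [List.dropWhile_eq_nil_iff]
    intro c hc; exact h c hc
  have hwsr : List.dropWhile PySem.Chars.isspace ws.reverse = [] := by
    rw [List.dropWhile_eq_nil_iff]
    intro c hc; exact h c (List.mem_reverse.mp hc)
  simp only [PySem.Chars.strip, PySem.Chars.lstrip, PySem.Chars.rstrip]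
  rw [List.dropWhile_append]
  by_cases hcs : (List.dropWhile PySem.Chars.isspace cs).isEmpty
  · simp [hws, List.isEmpty_iff.mp hcs]
  · have hb : (List.dropWhile PySem.Chars.isspace cs).isEmpty = false := by
      simpa using hcs
    simp only [hb, Bool.false_eq_true, if_false]
    rw [List.reverse_append, List.dropWhile_append, hwsr]
    simp

lemma chars_join_append_single (sep y : List Char) :
    ∀ (xs : List (List Char)), xs ≠ [] →
      PySem.Chars.join sep (xs ++ [y]) = PySem.Chars.join sep xs ++ sep ++ y := by
  intro xs
  induction xs with
  | nil => intro h; exact absurd rfl h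
  | cons a xs ih =>
    intro _
    cases xs with
    | nil => simp [PySem.Chars.join, List.intercalate]
    | cons b xs' =>
      have ih' := ih (by simp)
      rw [List.cons_append] at ih'
      show PySem.Chars.join sep (a :: b :: (xs' ++ [y]))
          = PySem.Chars.join sep (a :: b :: xs') ++ sep ++ y
      rw [PySem.Chars.join_cons_cons, ih', PySem.Chars.join_cons_cons]
      simp [List.append_assoc]

lemma chars_strip_join_replicate : ∀ (k : Nat) (xs : List (List Char)),
    PySem.Chars.strip (PySem.Chars.join [' '] (xs ++ List.replicate k ['\n']))
      = PySem.Chars.strip (PySem.Chars.join [' '] xs) := by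
  intro k
  induction k with
  | zero => intro xs; simp
  | succ k ih =>
    intro xs
    rw [List.replicate_succ' (n := k), ← List.append_assoc]
    by_cases h : xs ++ List.replicate k ['\n'] = []
    · rcases List.append_eq_nil_iff.mp h with ⟨hx, hr⟩
      have hk0 : k = 0 := by simpa using congrArg List.length hr
      subst hx hk0
      simp [PySem.Chars.join_nil, PySem.Chars.join_singleton, PySem.Chars.strip,
        PySem.Chars.lstrip, PySem.Chars.rstrip, List.dropWhile, PySem.Chars.isspace]
    · rw [chars_join_append_single [' '] ['\n'] _ h, List.append_assoc,
        strip_append_ws _ ([' '] ++ ['\n'])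
        (by intro c hc; rcases List.mem_append.mp hc with h | h <;> simp_all <;> subst h <;> rfl), ih]

lemma str_strip_join_replicate (P : List String) (k : Nat) :
    PySem.Str.strip (PySem.Str.join " " (P ++ List.replicate k "\n"))
      = PySem.Str.strip (PySem.Str.join " " P) := by
  simp only [PySem.Str.strip, PySem.Str.join, String.toList_ofList]
  congr 1
  have hmap : (P ++ List.replicate k "\n").map String.toList
      = P.map String.toList ++ List.replicate k ['\n'] := by
    simp [List.map_replicate]
  rw [hmap]
  have : (" " : String).toList = [' '] := by decide
  rw [this]
  exact chars_strip_join_replicate k (P.map String.toList)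

-- ===== VERDICT (by name: the statement is the Claim_ definition above) =====
theorem truncating_words_spec : Claim_equal_truncating_words := by
  intro document max_tokens _
  show truncating_words document max_tokens = truncating_words_alt document max_tokens
  unfold truncating_words truncating_words_alt
  rw [twFlatB_eq]
  obtain ⟨k, hk⟩ := twScanB_eq_twOuterA max_tokens
    ((PySem.Chars.splitOn document.toList ['\n']).map String.ofList) 0
  rw [hk, str_strip_join_replicate]
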